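-- pv_equiv track=rewrite | github.com/arturfarriols/Toro-BitsxlaMarato-2023 | src/core/cardiac_frequency.py | get_decelerations
-- ===== SOURCE A (Python) =====
-- def get_decelerations(subdictionaries, mean, ratio):
--     amount_of_decelerations = 0
--     for dictionary in subdictionaries:
--         if len(dictionary.keys())  > 50:
--             amount_of_anomalous_values = 0
--             for value in dictionary.values():
--                 if value < mean + 15 * ratio:
--                     amount_of_anomalous_values += 1
--                 else:
--                     if amount_of_anomalous_values > 15:
--                         amount_of_decelerations += 1
--                     amount_of_anomalous_values = 0
--
--             if amount_of_anomalous_values > 15: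
--                 amount_of_decelerations += 1
--     return amount_of_decelerations
-- ===== SOURCE B (Python) =====
-- def get_decelerations(subdictionaries, mean, ratio):
--     threshold = mean + 15 * ratio
--     total = 0
--     for dictionary in subdictionaries:
--         if len(dictionary) > 50:
--             flags = ''.join('1' if v < threshold else '0' for v in dictionary.values())
--             total += sum(1 for run in flags.split('0') if len(run) > 15)
--     return total
-- ===== Notes on version B (the rewrite author's own statement) =====
-- stated objective: simpler
-- what changed: Replaces A's running-counter state machine (with its duplicated trailing-run check inside and after the loop) by one grouping pass: mark each value anomalous, split the flag sequence into maximal anomalous runs, and count runs longer than 15.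
import Mathlib
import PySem

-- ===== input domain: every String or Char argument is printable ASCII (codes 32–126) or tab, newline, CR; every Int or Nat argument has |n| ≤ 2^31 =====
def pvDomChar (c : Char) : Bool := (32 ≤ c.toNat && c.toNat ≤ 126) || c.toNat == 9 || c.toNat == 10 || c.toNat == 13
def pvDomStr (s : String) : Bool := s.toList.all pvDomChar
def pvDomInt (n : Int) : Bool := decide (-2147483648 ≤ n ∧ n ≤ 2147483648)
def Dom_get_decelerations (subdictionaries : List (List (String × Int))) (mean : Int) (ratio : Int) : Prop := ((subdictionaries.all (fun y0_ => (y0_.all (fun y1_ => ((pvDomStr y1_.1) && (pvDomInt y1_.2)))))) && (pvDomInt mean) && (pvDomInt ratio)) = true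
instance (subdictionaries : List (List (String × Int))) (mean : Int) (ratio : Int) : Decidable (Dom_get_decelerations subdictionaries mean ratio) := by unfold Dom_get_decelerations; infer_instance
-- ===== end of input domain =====

-- B replaces A's running-counter state machine (with its duplicated trailing-run check) by one
-- grouping pass: mark each value anomalous/normal, split into maximal anomalous runs, count the
-- runs longer than 15 — objective: simpler.

-- ===== PORT A =====
-- Each dict argument is dict(pairs): insertion order, last value per key wins (PySem.Dict.ofList).
def get_decelerations (subdictionaries : List (List (String × Int))) (mean : Int) (ratio : Int) : Int :=
  subdictionaries.foldl (fun amount_of_decelerations pairs =>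
    let dictionary := PySem.Dict.ofList pairs
    if (dictionary.keys.length : Int) > 50 then
      let s := dictionary.values.foldl (fun (st : Int × Int) value =>
        if value < mean + 15 * ratio then (st.1 + 1, st.2)
        else (0, if st.1 > 15 then st.2 + 1 else st.2)) (0, amount_of_decelerations)
      if s.1 > 15 then s.2 + 1 else s.2
    else amount_of_decelerations) 0

-- ===== PORT B =====
-- ''.join(flags).split('0'): lengths of the segments between the 'false' marks (Source B's string
-- split modelled directly on the list of flags; includes the empty segments, as split does).
def pvSegs : List Bool → Int × List Int
  | [] => (0, [])
  | b :: bs =>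
    let p := pvSegs bs
    if b then (p.1 + 1, p.2) else (0, p.1 :: p.2)

def get_decelerations_alt (subdictionaries : List (List (String × Int))) (mean : Int) (ratio : Int) : Int :=
  let threshold := mean + 15 * ratio
  subdictionaries.foldl (fun total pairs =>
    let dictionary := PySem.Dict.ofList pairs
    if (dictionary.size : Int) > 50 then
      let flags := dictionary.values.map (fun v => decide (v < threshold))
      let p := pvSegs flags
      total + (((p.1 :: p.2).countP (fun run => decide (run > 15)) : Nat) : Int)
    else total) 0

-- ===== PRECONDITION & SPEC =====
def Spec_get_decelerations (subdictionaries : List (List (String × Int))) (mean : Int) (ratio : Int) (out : Int) : Prop := out = get_decelerations_alt subdictionaries mean ratio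
instance (subdictionaries : List (List (String × Int))) (mean : Int) (ratio : Int) (out : Int) : Decidable (Spec_get_decelerations subdictionaries mean ratio out) := by unfold Spec_get_decelerations; infer_instance

-- ===== CLAIM (what is proved, stated in full; the proofs are below) =====
def Claim_equal_get_decelerations : Prop := ∀ (subdictionaries : List (List (String × Int))) (mean : Int) (ratio : Int), Dom_get_decelerations subdictionaries mean ratio → Spec_get_decelerations subdictionaries mean ratio (get_decelerations subdictionaries mean ratio)

-- ===== LEMMAS AND PROOFS =====

-- A's inner loop (from counter a, accumulator d) plus its trailing-run check equals d plus the
-- number of long anomalous runs, the first run being extended by the a pending anomalous values.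
theorem pv_inner_eq (t : Int) (vs : List Int) (a d : Int) :
    (let s := vs.foldl (fun (st : Int × Int) value =>
        if value < t then (st.1 + 1, st.2)
        else (0, if st.1 > 15 then st.2 + 1 else st.2)) (a, d)
     if s.1 > 15 then s.2 + 1 else s.2)
    = d + (if a + (pvSegs (vs.map (fun v => decide (v < t)))).1 > 15 then 1 else 0)
        + (((pvSegs (vs.map (fun v => decide (v < t)))).2.countP (fun run => decide (run > 15)) : Nat) : Int) := by
  induction vs generalizing a d with
  | nil => simp [pvSegs]; split_ifs <;> omega
  | cons v vs ih =>
    by_cases hv : v < t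
    · simp only [List.foldl_cons, List.map_cons, hv, if_pos, decide_eq_true_eq, pvSegs]
      rw [ih]
      simp
      have : a + ((pvSegs (vs.map (fun v => decide (v < t)))).1 + 1)
           = a + 1 + (pvSegs (vs.map (fun v => decide (v < t)))).1 := by ring
      rw [this]
    · simp only [List.foldl_cons, List.map_cons, hv, decide_eq_true_eq, pvSegs]
      rw [ih]
      simp [List.countP_cons]
      split_ifs <;> omega

theorem pv_outer_eq (mean ratio : Int) (subs : List (List (String × Int))) (acc : Int) :
    subs.foldl (fun amount_of_decelerations pairs =>
      let dictionary := PySem.Dict.ofList pairs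
      if (dictionary.keys.length : Int) > 50 then
        let s := dictionary.values.foldl (fun (st : Int × Int) value =>
          if value < mean + 15 * ratio then (st.1 + 1, st.2)
          else (0, if st.1 > 15 then st.2 + 1 else st.2)) (0, amount_of_decelerations)
        if s.1 > 15 then s.2 + 1 else s.2
      else amount_of_decelerations) acc
    = subs.foldl (fun total pairs =>
      let dictionary := PySem.Dict.ofList pairs
      if (dictionary.size : Int) > 50 then
        let flags := dictionary.values.map (fun v => decide (v < mean + 15 * ratio))
        let p := pvSegs flags
        total + (((p.1 :: p.2).countP (fun run => decide (run > 15)) : Nat) : Int)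
      else total) acc := by
  induction subs generalizing acc with
  | nil => rfl
  | cons pairs subs ih =>
    simp only [List.foldl_cons]
    rw [← ih]
    congr 1
    have hsz : ((PySem.Dict.ofList pairs).keys.length : Int) = ((PySem.Dict.ofList pairs).size : Int) := by
      simp [PySem.Dict.keys, PySem.Dict.size]
    rw [hsz]
    by_cases h : ((PySem.Dict.ofList pairs).size : Int) > 50
    · simp only [h, if_pos]
      rw [pv_inner_eq (mean + 15 * ratio) (PySem.Dict.ofList pairs).values 0 acc]
      simp [List.countP_cons]
      split_ifs <;> push_cast <;> omega
    · simp [h]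

-- ===== VERDICT (by name: the statement is the Claim_ definition above) =====
theorem get_decelerations_spec : Claim_equal_get_decelerations := by
  intro subs mean ratio _
  unfold Spec_get_decelerations get_decelerations get_decelerations_alt
  exact pv_outer_eq mean ratio subs 0
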